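-- pv_equiv track=rewrite | github.com/magpern/venus-chargerybms | driver/chargerybms.py | get_header_position
-- ===== SOURCE A (Python) =====
-- PACKET_HEADER             = 0x24
--
-- def get_header_position(packet):
--
-- 	# detect header position
-- 	previous_packet_byte = "0"
-- 	pos_iterator = -1
-- 	for packet_byte in packet:
-- 		pos_iterator += 1
-- 		if ((ord(previous_packet_byte) == PACKET_HEADER) and (ord(packet_byte) == PACKET_HEADER)):
-- 			break
-- 		previous_packet_byte = packet_byte
--
-- 	return pos_iterator
-- ===== SOURCE B (Python) =====
-- PACKET_HEADER = 0x24
--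
-- def get_header_position(packet):
--     # stage 1: collect the indices of all header bytes
--     positions = [i for i, ch in enumerate(packet) if ord(ch) == PACKET_HEADER]
--     # stage 2: first adjacent pair of indices that are consecutive
--     for p, q in zip(positions, positions[1:]):
--         if q == p + 1:
--             return q
--     return len(packet) - 1
-- ===== Notes on version B (the rewrite author's own statement) =====
-- stated objective: alternative
-- what changed: Two staged passes instead of A's stateful previous-byte scan: first build the list of indices of all header bytes, then look for the first adjacent pair of consecutive indices; the fall-through value len(packet)-1 matches A's loop-exhaustion result.
import Mathlib
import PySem

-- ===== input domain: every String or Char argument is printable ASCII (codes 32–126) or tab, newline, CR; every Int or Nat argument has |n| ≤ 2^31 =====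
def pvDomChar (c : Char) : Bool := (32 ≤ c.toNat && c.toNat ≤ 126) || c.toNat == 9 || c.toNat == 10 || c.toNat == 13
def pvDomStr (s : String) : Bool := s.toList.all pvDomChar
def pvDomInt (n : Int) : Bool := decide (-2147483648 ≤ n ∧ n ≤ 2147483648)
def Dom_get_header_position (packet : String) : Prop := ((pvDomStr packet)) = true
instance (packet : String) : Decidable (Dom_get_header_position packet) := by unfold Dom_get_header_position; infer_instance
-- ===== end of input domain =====

-- B replaces A's stateful previous-byte scan by two staged passes (collect all header-byte indices, then find the first adjacent consecutive pair); alternative decomposition, same cost.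

-- ===== PORT A =====
-- the loop: pos_iterator += 1; break on two consecutive header bytes; else previous := current
def pvLoopA : List Char → Char → Int → Int
  | [], _, pos => pos
  | c :: cs, prev, pos =>
    if prev.toNat = 36 ∧ c.toNat = 36 then pos + 1
    else pvLoopA cs c (pos + 1)

def get_header_position (packet : String) : Int :=
  pvLoopA packet.toList '0' (-1)

-- ===== PORT B =====
-- stage 2 loop: for p, q in zip(positions, positions[1:]): if q == p + 1: return q
def pvFirstAdj : List (Int × Int) → Option Int
  | [] => none
  | (p, q) :: rest => if q = p + 1 then some q else pvFirstAdj rest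

def get_header_position_alt (packet : String) : Int :=
  let positions := ((PySem.List.enumerate packet.toList).filter
      (fun pc => pc.2.toNat = 36)).map Prod.fst
  match pvFirstAdj (positions.zip positions.tail) with
  | some q => q
  | none => PySem.Str.len packet - 1

-- ===== PRECONDITION & SPEC =====
def Spec_get_header_position (packet : String) (out : Int) : Prop := out = get_header_position_alt packet
instance (packet : String) (out : Int) : Decidable (Spec_get_header_position packet out) := by unfold Spec_get_header_position; infer_instance

-- ===== CLAIM =====
def Claim_equal_get_header_position : Prop := ∀ (packet : String), Dom_get_header_position packet → Spec_get_header_position packet (get_header_position packet)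

-- ===== LEMMAS AND PROOFS =====

-- header-byte positions of a suffix whose first index is k
def pvPosFrom : List Char → Int → List Int
  | [], _ => []
  | c :: cs, k => if c.toNat = 36 then k :: pvPosFrom cs (k + 1) else pvPosFrom cs (k + 1)

-- B's pair scan over zip(l, l.tail) as a direct recursion on l
def pvPairScan : List Int → Option Int
  | p :: q :: rest => if q = p + 1 then some q else pvPairScan (q :: rest)
  | _ => none

theorem pvFirstAdj_zip (l : List Int) : pvFirstAdj (l.zip l.tail) = pvPairScan l := by
  induction l with
  | nil => rfl
  | cons p l ih =>
    cases l with
    | nil => rfl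
    | cons q rest =>
      simp only [List.tail_cons, List.zip_cons_cons, pvFirstAdj, pvPairScan]
      split_ifs with h
      · rfl
      · simpa using ih

theorem pvPositions_eq (l : List Char) (k : Int) :
    ((PySem.List.enumerate l k).filter (fun pc => pc.2.toNat = 36)).map Prod.fst
      = pvPosFrom l k := by
  induction l generalizing k with
  | nil => simp [PySem.List.enumerate_nil, pvPosFrom]
  | cons c cs ih =>
    by_cases hc : c.toNat = 36 <;>
      simp [PySem.List.enumerate_cons, pvPosFrom, hc, ih]

theorem pvPosFrom_lower (l : List Char) (k m : Int) (hm : m ∈ pvPosFrom l k) : k ≤ m := by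
  induction l generalizing k with
  | nil => simp [pvPosFrom] at hm
  | cons c cs ih =>
    simp only [pvPosFrom] at hm
    split_ifs at hm with h
    · rcases List.mem_cons.mp hm with h' | h'
      · omega
      · have := ih (k + 1) h'; omega
    · have := ih (k + 1) hm; omega

-- main invariant: A's loop on a suffix starting at index k, with a non-triggering previous byte
theorem pvLoop_eq (cs : List Char) (prev : Char) (k : Int)
    (hnt : ¬ (prev.toNat = 36 ∧ cs.head?.map Char.toNat = some 36)) :
    pvLoopA cs prev (k - 1) =
      (pvPairScan (pvPosFrom cs k)).getD (k + cs.length - 1) := by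
  induction cs generalizing prev k with
  | nil => simp [pvLoopA, pvPosFrom, pvPairScan]
  | cons c cs' ih =>
    have hstep : pvLoopA (c :: cs') prev (k - 1) = pvLoopA cs' c k := by
      have hb : ¬ (prev.toNat = 36 ∧ c.toNat = 36) := by
        intro h; exact hnt ⟨h.1, by simp [h.2]⟩
      simp [pvLoopA, hb]
    rw [hstep]
    by_cases hbrk : c.toNat = 36 ∧ cs'.head?.map Char.toNat = some 36
    · -- next step breaks at index k+1
      obtain ⟨hc, hd⟩ := hbrk
      cases cs' with
      | nil => simp at hd
      | cons d ds =>
        have hd' : d.toNat = 36 := by simpa using hd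
        have hbreak : pvLoopA (d :: ds) c k = k + 1 := by
          simp [pvLoopA, hc, hd']
        rw [hbreak]
        simp [pvPosFrom, hc, hd', pvPairScan]
    · have ihc : pvLoopA cs' c k = (pvPairScan (pvPosFrom cs' (k + 1))).getD (k + cs'.length) := by
        have h := ih c (k + 1) hbrk
        rw [show k + 1 - 1 = k by ring] at h
        rw [h]
        congr 1
        ring
      rw [ihc]
      by_cases hc : c.toNat = 36
      · -- c is a header byte, but the next one is not: k heads the position list harmlessly
        simp only [pvPosFrom, if_pos hc]
        have htail : pvPairScan (k :: pvPosFrom cs' (k + 1)) = pvPairScan (pvPosFrom cs' (k + 1)) := by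
          cases hrest : pvPosFrom cs' (k + 1) with
          | nil => rfl
          | cons m rest =>
            have hmge : k + 1 ≤ m := pvPosFrom_lower cs' (k + 1) m (by rw [hrest]; exact List.mem_cons_self)
            have hmne : m ≠ k + 1 := by
              intro hme
              cases cs' with
              | nil => simp [pvPosFrom] at hrest
              | cons d ds =>
                by_cases hd : d.toNat = 36
                · exact hbrk ⟨hc, by simp [hd]⟩
                · have hsh : pvPosFrom (d :: ds) (k + 1) = pvPosFrom ds (k + 1 + 1) := by
                    simp [pvPosFrom, hd]
                  have : k + 1 + 1 ≤ m := pvPosFrom_lower ds _ m (by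
                    rw [hsh] at hrest; simp [hrest])
                  omega
            simp [pvPairScan, hmne]
        rw [htail]
        simp only [List.length_cons]
        congr 1
        push_cast
        ring
      · simp only [pvPosFrom, if_neg hc, List.length_cons]
        congr 1
        push_cast
        ring

-- ===== VERDICT =====
theorem get_header_position_spec : Claim_equal_get_header_position := by
  intro packet _
  unfold Spec_get_header_position get_header_position get_header_position_alt
  show pvLoopA packet.toList '0' (-1) =
    (match pvFirstAdj ((((PySem.List.enumerate packet.toList).filter
        (fun pc => pc.2.toNat = 36)).map Prod.fst).zip
        (((PySem.List.enumerate packet.toList).filter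
        (fun pc => pc.2.toNat = 36)).map Prod.fst).tail) with
    | some q => q
    | none => PySem.Str.len packet - 1)
  rw [pvFirstAdj_zip, pvPositions_eq]
  have h0 : ¬ ((('0' : Char).toNat = 36) ∧ packet.toList.head?.map Char.toNat = some 36) := by
    intro h; simpa using h.1
  rw [show (-1 : Int) = 0 - 1 by ring, pvLoop_eq _ _ _ h0]
  cases h : pvPairScan (pvPosFrom packet.toList 0) with
  | none => simp [PySem.Str.len_eq]
  | some q => simp
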